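-- pv_equiv track=rewrite | github.com/milsi96/advent-of-code-2024 | src/advent_of_code/day22/main.py | get_next_secret_at
-- ===== SOURCE A (Python) =====
-- from functools import partial
--
-- def get_next_secret_at(secret: int, at: int) -> int:
--     def get_next_secret(from_number: int) -> int:
--         def multiply(multiplier: int, number: int) -> int:
--             return number * multiplier
--
--         def divide(divisor: int, number: int) -> int:
--             return number // divisor
--
--         def mix(n1: int, n2: int) -> int:
--             return n1 ^ n2
--
--         def prune(number: int) -> int:
--             return number % 16777216
--
--         multiply_by_64 = partial(multiply, 64)
--         divide_by_32 = partial(divide, 32)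
--         multiply_by_2048 = partial(multiply, 2048)
--
--         secret = from_number
--         secret = prune(mix(n1=multiply_by_64(secret), n2=secret))
--         secret = prune(mix(n1=divide_by_32(secret), n2=secret))
--         secret = prune(mix(n1=multiply_by_2048(secret), n2=secret))
--
--         return secret
--
--     result: int = secret
--     for _ in range(at):
--         result = get_next_secret(from_number=result)
--     return result
-- ===== SOURCE B (Python) =====
-- # Faster exact re-implementation: the AoC day-22 step is GF(2)-linear on 24 bits,
-- # so iterate it with 24x24 boolean-matrix fast exponentiation (O(24^2 log at) xors)
-- # instead of A's O(at) loop.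
--
-- MOD = 1 << 24
--
--
-- def _step(x: int) -> int:
--     x = (x ^ (x << 6)) % MOD
--     x = (x ^ (x >> 5)) % MOD
--     x = (x ^ (x << 11)) % MOD
--     return x
--
--
-- def _apply(m: list, v: int) -> int:
--     # m holds the 24 columns (images of basis vectors) as 24-bit integers
--     out = 0
--     for j in range(24):
--         if (v >> j) & 1:
--             out ^= m[j]
--     return out
--
--
-- def _compose(g: list, f: list) -> list:
--     return [_apply(g, c) for c in f]
--
--
-- def get_next_secret_at(secret: int, at: int) -> int:
--     if at <= 0:
--         return secret
--     base = [_step(1 << j) for j in range(24)]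
--     acc = [1 << j for j in range(24)]  # identity matrix
--     n = at
--     while n > 0:
--         if n & 1:
--             acc = _compose(base, acc)
--         base = _compose(base, base)
--         n >>= 1
--     return _apply(acc, secret % MOD)
-- ===== Notes on version B (the rewrite author's own statement) =====
-- stated objective: faster
-- what changed: A iterates the secret-update step `at` times; B exploits that the step is GF(2)-linear on 24 bits and applies its 24x24 boolean matrix raised to the `at`-th power by binary exponentiation, O(log at) matrix operations instead of O(at) steps.
import Mathlib
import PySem

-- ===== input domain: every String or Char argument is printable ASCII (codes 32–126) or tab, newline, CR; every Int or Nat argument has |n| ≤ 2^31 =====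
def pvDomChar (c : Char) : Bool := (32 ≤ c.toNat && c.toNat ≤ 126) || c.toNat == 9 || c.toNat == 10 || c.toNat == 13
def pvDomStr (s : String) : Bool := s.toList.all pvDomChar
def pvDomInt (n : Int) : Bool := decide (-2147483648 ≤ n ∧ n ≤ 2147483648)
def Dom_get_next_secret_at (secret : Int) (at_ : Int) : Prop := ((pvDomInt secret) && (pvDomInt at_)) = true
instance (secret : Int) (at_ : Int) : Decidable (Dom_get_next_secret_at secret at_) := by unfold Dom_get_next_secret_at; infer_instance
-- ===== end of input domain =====

-- B replaces A's `at`-step loop by fast exponentiation of the 24-column GF(2) matrix of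
-- the (GF(2)-linear) step; measured faster at large `at`.

-- ===== PORT A =====
-- inner get_next_secret: the three mix/prune stages, with multiply_by_64, divide_by_32,
-- multiply_by_2048 inlined as the arithmetic the partials perform
def pvGetNextSecret (from_number : Int) : Int :=
  let secret := from_number
  let secret := PySem.Int.mod (PySem.Int.bxor (secret * 64) secret) 16777216
  let secret := PySem.Int.mod (PySem.Int.bxor (PySem.Int.floordiv secret 32) secret) 16777216
  let secret := PySem.Int.mod (PySem.Int.bxor (secret * 2048) secret) 16777216
  secret

def get_next_secret_at (secret : Int) (at_ : Int) : Int :=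
  (PySem.List.pyRange 0 at_ 1).foldl (fun result _ => pvGetNextSecret result) secret

-- ===== PORT B =====
-- _step of Source B (operands are nonnegative there, so Nat ^^^, <<<, >>>, % are exact)
def pvStep (x : Nat) : Nat :=
  let x := (x ^^^ (x <<< 6)) % 16777216
  let x := (x ^^^ (x >>> 5)) % 16777216
  let x := (x ^^^ (x <<< 11)) % 16777216
  x

-- _apply of Source B; every matrix B builds has exactly 24 columns, so `List.getD j 0`
-- is exact for Python's m[j] at each j in range(24)
def pvApply (m : List Nat) (v : Nat) : Nat :=
  (List.range 24).foldl (fun out j => if (v >>> j) &&& 1 = 1 then out ^^^ m.getD j 0 else out) 0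

-- _compose of Source B
def pvCompose (g f : List Nat) : List Nat := f.map (pvApply g)

-- the while-loop of Source B (n & 1 and n >>= 1 written as % 2 and / 2)
def pvPowLoop (base acc : List Nat) (n : Nat) : List Nat :=
  if h : n = 0 then acc
  else pvPowLoop (pvCompose base base)
        (if n % 2 = 1 then pvCompose base acc else acc) (n / 2)
  termination_by n
  decreasing_by exact Nat.div_lt_self (Nat.pos_of_ne_zero h) one_lt_two

def get_next_secret_at_alt (secret : Int) (at_ : Int) : Int :=
  if at_ ≤ 0 then secret
  else
    let base := (List.range 24).map (fun j => pvStep (1 <<< j))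
    let acc := (List.range 24).map (fun j => (1 <<< j : Nat))
    ((pvApply (pvPowLoop base acc at_.toNat) ((PySem.Int.mod secret 16777216).toNat) : Nat) : Int)

-- ===== PRECONDITION & SPEC =====
def Spec_get_next_secret_at (secret : Int) (at_ : Int) (out : Int) : Prop := out = get_next_secret_at_alt secret at_
instance (secret : Int) (at_ : Int) (out : Int) : Decidable (Spec_get_next_secret_at secret at_ out) := by unfold Spec_get_next_secret_at; infer_instance

-- ===== CLAIM (what is proved, stated in full; the proofs are below) =====
def Claim_equal_get_next_secret_at : Prop := ∀ (secret : Int) (at_ : Int), Dom_get_next_secret_at secret at_ → Spec_get_next_secret_at secret at_ (get_next_secret_at secret at_)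

-- ===== LEMMAS AND PROOFS =====

-- ---- generic facts about Nat xor ----

-- x ^^^ (2^n - 1) is the n-bit complement
theorem pv_xor_mask {n x : Nat} (h : x < 2 ^ n) : x ^^^ (2 ^ n - 1) = 2 ^ n - 1 - x := by
  induction n generalizing x with
  | zero => interval_cases x; rfl
  | succ n ih =>
    have hpow : 0 < 2 ^ n := Nat.two_pow_pos n
    have hP : 2 ^ (n+1) = 2 * 2 ^ n := by rw [pow_succ]; ring
    have hxl : x / 2 < 2 ^ n := by omega
    have hd : (x ^^^ (2 ^ (n+1) - 1)) / 2 = 2 ^ n - 1 - x / 2 := by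
      rw [Nat.xor_div_two]
      have h2 : (2 ^ (n+1) - 1) / 2 = 2 ^ n - 1 := by omega
      rw [h2]; exact ih hxl
    have hm : (x ^^^ (2 ^ (n+1) - 1)) % 2 = (x % 2) ^^^ ((2 ^ (n+1) - 1) % 2) := by
      have := Nat.xor_mod_two_pow (a := x) (b := 2 ^ (n+1) - 1) (n := 1)
      simpa using this
    have hb : (2 ^ (n+1) - 1) % 2 = 1 := by omega
    rw [hb] at hm
    have hxm : (x ^^^ (2 ^ (n+1) - 1)) % 2 = 1 - x % 2 := by
      rcases Nat.mod_two_eq_zero_or_one x with h'|h' <;> rw [h'] at hm <;> simp [hm, h']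
    have e1 := Nat.div_add_mod (x ^^^ (2 ^ (n+1) - 1)) 2
    omega

-- r ^^^ 2^k = r + 2^k when r < 2^k
theorem pv_xor_pow {k r : Nat} (h : r < 2 ^ k) : r ^^^ 2 ^ k = r + 2 ^ k := by
  induction k generalizing r with
  | zero => interval_cases r; rfl
  | succ k ih =>
    have hpow : 0 < 2 ^ k := Nat.two_pow_pos k
    have hP : 2 ^ (k+1) = 2 * 2 ^ k := by rw [pow_succ]; ring
    have hd : (r ^^^ 2 ^ (k+1)) / 2 = r / 2 + 2 ^ k := by
      rw [Nat.xor_div_two]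
      have h2 : 2 ^ (k+1) / 2 = 2 ^ k := by omega
      rw [h2]; exact ih (by omega)
    have hm : (r ^^^ 2 ^ (k+1)) % 2 = (r % 2) ^^^ (2 ^ (k+1) % 2) := by
      have := Nat.xor_mod_two_pow (a := r) (b := 2 ^ (k+1)) (n := 1)
      simpa using this
    have hb : 2 ^ (k+1) % 2 = 0 := by omega
    have hm2 : (r ^^^ 2 ^ (k+1)) % 2 = r % 2 := by rw [hb] at hm; simpa using hm
    have e1 := Nat.div_add_mod (r ^^^ 2 ^ (k+1)) 2
    omega

theorem pv_xor4 (C A B : Nat) : C ^^^ A ^^^ (C ^^^ B) = A ^^^ B := by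
  rw [← Nat.xor_assoc, Nat.xor_comm (C ^^^ A) C, ← Nat.xor_assoc, Nat.xor_self, Nat.zero_xor]

-- ---- Python `%` by 2^24 of a Python xor, on possibly negative ints ----

theorem pv_bxor_mod (a b : Int) :
    PySem.Int.mod (PySem.Int.bxor a b) 16777216 =
      (((PySem.Int.mod a 16777216).toNat ^^^ (PySem.Int.mod b 16777216).toNat : Nat) : Int) := by
  have hmod : ∀ c : Int, PySem.Int.mod c 16777216 = c % 16777216 :=
    fun c => PySem.Int.mod_eq_emod_of_pos (by norm_num)
  have h224 : (16777216 : Nat) = 2 ^ 24 := by norm_num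
  rw [hmod, hmod, hmod]
  unfold PySem.Int.bxor
  by_cases ha : 0 ≤ a <;> by_cases hb : 0 ≤ b <;> simp only [ha, hb, if_pos, if_false]
  · -- a ≥ 0, b ≥ 0
    set u := a.toNat; set m := b.toNat
    have h1 : (a % 16777216).toNat = u % 16777216 := by omega
    have h2 : (b % 16777216).toNat = m % 16777216 := by omega
    rw [h1, h2, h224, ← Nat.xor_mod_two_pow, ← h224]
    omega
  · -- a ≥ 0, b < 0
    set u := a.toNat; set m := (-b - 1).toNat
    have h1 : (a % 16777216).toNat = u % 16777216 := by omega
    have h2 : (b % 16777216).toNat = 2 ^ 24 - 1 - m % 2 ^ 24 := by omega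
    have hN : (u ^^^ m) % 2 ^ 24 = u % 2 ^ 24 ^^^ m % 2 ^ 24 := Nat.xor_mod_two_pow
    have hgoal : (u % 16777216) ^^^ (2 ^ 24 - 1 - m % 2 ^ 24) = 2 ^ 24 - 1 - (u ^^^ m) % 2 ^ 24 := by
      rw [← pv_xor_mask (Nat.mod_lt _ (by norm_num) : m % 2 ^ 24 < 2 ^ 24),
          ← Nat.xor_assoc, h224, ← hN,
          pv_xor_mask (Nat.mod_lt _ (by norm_num) : (u ^^^ m) % 2 ^ 24 < 2 ^ 24)]
    rw [h1, h2, hgoal]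
    omega
  · -- a < 0, b ≥ 0
    set u := (-a - 1).toNat; set m := b.toNat
    have h1 : (a % 16777216).toNat = 2 ^ 24 - 1 - u % 2 ^ 24 := by omega
    have h2 : (b % 16777216).toNat = m % 16777216 := by omega
    have hN : (u ^^^ m) % 2 ^ 24 = u % 2 ^ 24 ^^^ m % 2 ^ 24 := Nat.xor_mod_two_pow
    have hgoal : (2 ^ 24 - 1 - u % 2 ^ 24) ^^^ (m % 16777216) = 2 ^ 24 - 1 - (u ^^^ m) % 2 ^ 24 := by
      rw [← pv_xor_mask (Nat.mod_lt _ (by norm_num) : u % 2 ^ 24 < 2 ^ 24), h224]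
      rw [Nat.xor_comm (u % 2 ^ 24) (2 ^ 24 - 1), Nat.xor_assoc, ← hN, Nat.xor_comm,
          pv_xor_mask (Nat.mod_lt _ (by norm_num) : (u ^^^ m) % 2 ^ 24 < 2 ^ 24)]
    rw [h1, h2, hgoal]
    omega
  · -- a < 0, b < 0
    set u := (-a - 1).toNat; set m := (-b - 1).toNat
    have h1 : (a % 16777216).toNat = 2 ^ 24 - 1 - u % 2 ^ 24 := by omega
    have h2 : (b % 16777216).toNat = 2 ^ 24 - 1 - m % 2 ^ 24 := by omega
    have hN : (u ^^^ m) % 2 ^ 24 = u % 2 ^ 24 ^^^ m % 2 ^ 24 := Nat.xor_mod_two_pow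
    have hgoal : (2 ^ 24 - 1 - u % 2 ^ 24) ^^^ (2 ^ 24 - 1 - m % 2 ^ 24) = (u ^^^ m) % 2 ^ 24 := by
      rw [← pv_xor_mask (Nat.mod_lt _ (by norm_num) : u % 2 ^ 24 < 2 ^ 24),
          ← pv_xor_mask (Nat.mod_lt _ (by norm_num) : m % 2 ^ 24 < 2 ^ 24), hN]
      rw [Nat.xor_assoc, Nat.xor_comm (2 ^ 24 - 1), Nat.xor_assoc, Nat.xor_self, Nat.xor_zero]
    rw [h1, h2, hgoal]
    omega

-- ---- one step of A is one step of B on the 24 low bits ----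

theorem pv_mod_natCast (k : Nat) : PySem.Int.mod (k : Int) 16777216 = ((k % 16777216 : Nat) : Int) := by
  rw [PySem.Int.mod_eq_emod_of_pos (by norm_num)]; omega

theorem pv_stepDiv (n1 : Nat) :
    PySem.Int.mod (PySem.Int.bxor (PySem.Int.floordiv (n1 : Int) 32) (n1 : Int)) 16777216
      = (((n1 ^^^ n1 >>> 5) % 16777216 : Nat) : Int) := by
  have hdiv : PySem.Int.floordiv (n1 : Int) 32 = ((n1 / 32 : Nat) : Int) := by
    exact_mod_cast PySem.Int.floordiv_natCast n1 32
  have hsh : n1 >>> 5 = n1 / 32 := by rw [Nat.shiftRight_eq_div_pow]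
  rw [hdiv, PySem.Int.bxor_natCast, pv_mod_natCast, hsh, Nat.xor_comm]

theorem pv_stepMul2048 (n2 : Nat) :
    PySem.Int.mod (PySem.Int.bxor ((n2 : Int) * 2048) (n2 : Int)) 16777216
      = (((n2 ^^^ n2 <<< 11) % 16777216 : Nat) : Int) := by
  have hc : ((n2 : Int) * 2048) = ((n2 * 2048 : Nat) : Int) := by push_cast; ring
  have hsh : n2 <<< 11 = n2 * 2048 := by rw [Nat.shiftLeft_eq]
  rw [hc, PySem.Int.bxor_natCast, pv_mod_natCast, hsh, Nat.xor_comm]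

theorem pv_stepA_eq (s : Int) :
    pvGetNextSecret s = ((pvStep ((PySem.Int.mod s 16777216).toNat) : Nat) : Int) := by
  have hmod : ∀ c : Int, PySem.Int.mod c 16777216 = c % 16777216 :=
    fun c => PySem.Int.mod_eq_emod_of_pos (by norm_num)
  have h224 : (16777216 : Nat) = 2 ^ 24 := by norm_num
  set x : Nat := (PySem.Int.mod s 16777216).toNat with hxdef
  have hxe : (s % 16777216 : Int) = (x : Int) := by rw [hxdef, hmod]; omega
  have hx : x < 16777216 := by rw [hxdef, hmod]; omega
  have hm64 : (PySem.Int.mod (s * 64) 16777216).toNat = (x <<< 6) % 16777216 := by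
    rw [hmod, Int.mul_emod, hxe]
    have hsh : x <<< 6 = x * 64 := by rw [Nat.shiftLeft_eq]
    omega
  have h1 : PySem.Int.mod (PySem.Int.bxor (s * 64) s) 16777216
      = (((x ^^^ (x <<< 6)) % 16777216 : Nat) : Int) := by
    rw [pv_bxor_mod, hm64, ← hxdef]
    have hnat : (x <<< 6 % 16777216) ^^^ x = (x ^^^ x <<< 6) % 16777216 := by
      have hxm : x % 2 ^ 24 = x := Nat.mod_eq_of_lt (by omega)
      rw [h224, Nat.xor_mod_two_pow, hxm, Nat.xor_comm]
    exact congrArg Nat.cast hnat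
  simp only [pvGetNextSecret, pvStep]
  rw [h1, pv_stepDiv, pv_stepMul2048]

theorem pv_step_lt (y : Nat) : pvStep y < 16777216 := Nat.mod_lt _ (by norm_num)

-- ---- iterating A's step ----

theorem pv_foldl_const (l : List Int) (f : Int → Int) (s : Int) :
    l.foldl (fun r _ => f r) s = f^[l.length] s := by
  induction l generalizing s with
  | nil => rfl
  | cons a l ih => rw [List.foldl_cons, List.length_cons, ih, Function.iterate_succ_apply]

theorem pv_iter_step_lt (n y : Nat) : pvStep^[n] (pvStep y) < 16777216 := by
  induction n with
  | zero => exact pv_step_lt y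
  | succ n ih => rw [Function.iterate_succ_apply']; exact pv_step_lt _

theorem pv_iterA (n : Nat) (s : Int) :
    pvGetNextSecret^[n + 1] s =
      ((pvStep^[n] (pvStep ((PySem.Int.mod s 16777216).toNat)) : Nat) : Int) := by
  induction n with
  | zero => simpa using pv_stepA_eq s
  | succ n ih =>
    rw [Function.iterate_succ_apply', ih, pv_stepA_eq, pv_mod_natCast,
        Nat.mod_eq_of_lt (pv_iter_step_lt n _), Int.toNat_natCast,
        ← Function.iterate_succ_apply' pvStep]

-- ---- B: the fold of _apply over an arbitrary index list ----

def pvF (m : List Nat) (v : Nat) (l : List Nat) (out : Nat) : Nat :=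
  l.foldl (fun out j => if (v >>> j) &&& 1 = 1 then out ^^^ m.getD j 0 else out) out

theorem pvApply_eq_pvF (m : List Nat) (v : Nat) : pvApply m v = pvF m v (List.range 24) 0 := rfl

theorem pvF_out (m : List Nat) (v : Nat) (l : List Nat) (out : Nat) :
    pvF m v l out = out ^^^ pvF m v l 0 := by
  induction l generalizing out with
  | nil => simp [pvF]
  | cons j l ih =>
    simp only [pvF, List.foldl_cons] at *
    by_cases hb : (v >>> j) &&& 1 = 1 <;> simp only [hb, if_pos, if_false]
    · rw [ih (out ^^^ m.getD j 0), ih (0 ^^^ m.getD j 0), Nat.zero_xor, Nat.xor_assoc]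
    · exact ih out

theorem pvF_cons (m : List Nat) (v j : Nat) (l : List Nat) :
    pvF m v (j :: l) 0 = (if (v >>> j) &&& 1 = 1 then m.getD j 0 else 0) ^^^ pvF m v l 0 := by
  simp only [pvF, List.foldl_cons]
  by_cases hb : (v >>> j) &&& 1 = 1 <;> simp only [hb, if_pos, if_false]
  · rw [show (0 ^^^ m.getD j 0) = m.getD j 0 by simp]; exact pvF_out m v l _
  · simp

theorem pvF_zero (m : List Nat) (l : List Nat) : pvF m 0 l 0 = 0 := by
  induction l with
  | nil => rfl
  | cons j l ih => rw [pvF_cons]; simp [Nat.zero_shiftRight, ih]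

-- the selected bit of an xor is the xor of the selected bits
theorem pv_bit_xor (a b j : Nat) : ((a ^^^ b) >>> j) &&& 1 = ((a >>> j) &&& 1) ^^^ ((b >>> j) &&& 1) := by
  rw [Nat.shiftRight_xor_distrib, Nat.and_xor_distrib_right]

theorem pv_bit01 (v j : Nat) : (v >>> j) &&& 1 = 0 ∨ (v >>> j) &&& 1 = 1 := by
  rw [Nat.and_one_is_mod]; omega

-- linearity of the fold in v
theorem pvF_linear (m : List Nat) (a b : Nat) (l : List Nat) :
    pvF m (a ^^^ b) l 0 = pvF m a l 0 ^^^ pvF m b l 0 := by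
  induction l with
  | nil => simp [pvF]
  | cons j l ih =>
    rw [pvF_cons, pvF_cons, pvF_cons, ih]
    rcases pv_bit01 a j with h1|h1 <;> rcases pv_bit01 b j with h2|h2 <;>
      simp only [pv_bit_xor a b j, h1, h2] <;> norm_num
    · ac_rfl
    · ac_rfl
    · exact (pv_xor4 _ _ _).symm

theorem pvApply_linear (m : List Nat) (a b : Nat) :
    pvApply m (a ^^^ b) = pvApply m a ^^^ pvApply m b := by
  rw [pvApply_eq_pvF, pvApply_eq_pvF, pvApply_eq_pvF]; exact pvF_linear m a b _

theorem pvApply_zero (m : List Nat) : pvApply m 0 = 0 := pvF_zero m _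

theorem pv_getD_compose (g f : List Nat) (j : Nat) :
    (pvCompose g f).getD j 0 = pvApply g (f.getD j 0) := by
  unfold pvCompose
  by_cases h : j < f.length
  · rw [List.getD_eq_getElem _ _ (by simpa using h), List.getD_eq_getElem _ _ h, List.getElem_map]
  · rw [List.getD_eq_default _ _ (by simpa using h), List.getD_eq_default _ _ (by omega)]
    exact (pvApply_zero g).symm

theorem pvF_compose (g f : List Nat) (v : Nat) (l : List Nat) :
    pvF (pvCompose g f) v l 0 = pvApply g (pvF f v l 0) := by
  induction l with
  | nil => exact (pvApply_zero g).symm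
  | cons j l ih =>
    rw [pvF_cons, pvF_cons, pvApply_linear, ← ih, pv_getD_compose]
    rcases pv_bit01 v j with h|h <;> simp [h, pvApply_zero]

theorem pvApply_compose (g f : List Nat) (v : Nat) :
    pvApply (pvCompose g f) v = pvApply g (pvApply f v) := by
  rw [pvApply_eq_pvF, pvApply_eq_pvF (m := f), pvF_compose]

-- all columns below 2^24
def pvCols (m : List Nat) : Prop := ∀ c ∈ m, c < 16777216

theorem pv_getD_lt {m : List Nat} (h : pvCols m) (j : Nat) : m.getD j 0 < 16777216 := by
  by_cases hj : j < m.length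
  · exact h _ (by rw [List.getD_eq_getElem _ _ hj]; exact List.getElem_mem hj)
  · rw [List.getD_eq_default _ _ (by omega)]; norm_num

theorem pvF_lt {m : List Nat} (h : pvCols m) (v : Nat) (l : List Nat) {out : Nat}
    (hout : out < 16777216) : pvF m v l out < 16777216 := by
  induction l generalizing out with
  | nil => exact hout
  | cons j l ih =>
    simp only [pvF, List.foldl_cons]
    have e : (16777216 : Nat) = 2 ^ 24 := by norm_num
    by_cases hb : (v >>> j) &&& 1 = 1
    · rw [if_pos hb]
      exact ih (e ▸ Nat.xor_lt_two_pow (e ▸ hout) (e ▸ pv_getD_lt h j))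
    · rw [if_neg hb]; exact ih hout

theorem pvApply_lt {m : List Nat} (h : pvCols m) (v : Nat) : pvApply m v < 16777216 :=
  pvF_lt h v _ (by norm_num)

theorem pvCols_compose {g : List Nat} (hg : pvCols g) (f : List Nat) : pvCols (pvCompose g f) := by
  intro c hc
  rcases List.mem_map.mp hc with ⟨d, _, rfl⟩
  exact pvApply_lt hg d

-- ---- the matrix of a GF(2)-linear map on 24 bits ----

theorem pv_mod_succ (v k : Nat) :
    v % 2 ^ (k + 1) = v % 2 ^ k ^^^ (if (v >>> k) &&& 1 = 1 then 2 ^ k else 0) := by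
  have hpow : 0 < 2 ^ k := Nat.two_pow_pos k
  have hb : (v >>> k) &&& 1 = (v / 2 ^ k) % 2 := by
    rw [Nat.shiftRight_eq_div_pow, Nat.and_one_is_mod]
  have hmm : v % (2 ^ k * 2) = v % 2 ^ k + 2 ^ k * (v / 2 ^ k % 2) := Nat.mod_mul
  have hP : 2 ^ (k + 1) = 2 ^ k * 2 := by rw [pow_succ]
  rw [hP]
  rw [hb] at *
  rcases Nat.mod_two_eq_zero_or_one (v / 2 ^ k) with h|h <;> rw [h]
  · rw [if_neg (by omega), Nat.xor_zero, hmm, h, Nat.mul_zero, Nat.add_zero]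
  · rw [if_pos rfl, pv_xor_pow (Nat.mod_lt _ hpow), hmm, h, Nat.mul_one]

theorem pvF_matrix (h : Nat → Nat) (hlin : ∀ a b, h (a ^^^ b) = h a ^^^ h b) (h0 : h 0 = 0)
    (v : Nat) : ∀ k, k ≤ 24 →
    pvF ((List.range 24).map (fun j => h (1 <<< j))) v (List.range k) 0 = h (v % 2 ^ k) := by
  intro k
  induction k with
  | zero => intro _; rw [pow_zero, Nat.mod_one, h0]; rfl
  | succ k ih =>
    intro hk
    have hk' : k < 24 := by omega
    rw [show List.range (k + 1) = List.range k ++ [k] from List.range_succ]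
    rw [pvF, List.foldl_append]
    have hgd : ((List.range 24).map (fun j => h (1 <<< j))).getD k 0 = h (1 <<< k) := by
      rw [List.getD_eq_getElem _ _ (by simpa using hk'), List.getElem_map, List.getElem_range]
    have hprev : List.foldl (fun out j => if v >>> j &&& 1 = 1 then out ^^^ ((List.range 24).map (fun j => h (1 <<< j))).getD j 0 else out) 0 (List.range k) = h (v % 2 ^ k) := ih (by omega)
    rw [hprev]
    rw [pv_mod_succ v k, hlin]
    have hsl : (1 : Nat) <<< k = 2 ^ k := Nat.one_shiftLeft k
    rw [List.foldl_cons, List.foldl_nil]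
    rcases pv_bit01 v k with hb|hb <;> rw [hb]
    · rw [if_neg (show ¬(0 = 1) by omega), if_neg (show ¬(0 = 1) by omega), h0, Nat.xor_zero]
    · rw [if_pos rfl, if_pos rfl, hgd, hsl]

theorem pvStep_linear (a b : Nat) : pvStep (a ^^^ b) = pvStep a ^^^ pvStep b := by
  have e : (16777216 : Nat) = 2 ^ 24 := by norm_num
  have l1 : ∀ (c x y : Nat), ((x ^^^ y) ^^^ (x ^^^ y) <<< c) % 16777216
      = ((x ^^^ x <<< c) % 16777216) ^^^ ((y ^^^ y <<< c) % 16777216) := by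
    intro c x y
    rw [e, ← Nat.xor_mod_two_pow]
    congr 1
    rw [Nat.shiftLeft_xor_distrib]
    ac_rfl
  have l2 : ∀ (x y : Nat), ((x ^^^ y) ^^^ (x ^^^ y) >>> 5) % 16777216
      = ((x ^^^ x >>> 5) % 16777216) ^^^ ((y ^^^ y >>> 5) % 16777216) := by
    intro x y
    rw [e, ← Nat.xor_mod_two_pow]
    congr 1
    rw [Nat.shiftRight_xor_distrib]
    ac_rfl
  simp only [pvStep]
  rw [l1 6, l2, l1 11]

theorem pvStep_zero : pvStep 0 = 0 := rfl

-- ---- semantics of B's matrices and of the exponentiation loop ----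

def pvSem (m : List Nat) (f : Nat → Nat) : Prop := ∀ v, pvApply m v = f (v % 16777216)

theorem pvSem_compose {g f : List Nat} {fg ff : Nat → Nat} (hg : pvSem g fg) (hf : pvSem f ff)
    (hcf : pvCols f) : pvSem (pvCompose g f) (fun v => fg (ff v)) := by
  intro v
  have hlt := pvApply_lt hcf v
  rw [hf v] at hlt
  rw [pvApply_compose, hf, hg, Nat.mod_eq_of_lt hlt]

theorem pv_iter_double (g : Nat → Nat) (k x : Nat) : (fun w => g (g w))^[k] x = g^[2 * k] x := by
  induction k generalizing x with
  | zero => rfl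
  | succ k ih =>
    rw [Function.iterate_succ_apply, ih, show 2 * (k + 1) = 2 * k + 2 by ring,
      Function.iterate_add_apply]
    rfl

theorem pvPowLoop_correct : ∀ (n : Nat) (base acc : List Nat) (g f : Nat → Nat),
    pvSem base g → pvSem acc f → pvCols base → pvCols acc →
    pvSem (pvPowLoop base acc n) (fun v => g^[n] (f v)) ∧ pvCols (pvPowLoop base acc n) := by
  intro n
  induction n using Nat.strong_induction_on with
  | _ n ih =>
    intro base acc g f hbg haf hcb hca
    by_cases h0 : n = 0
    · subst h0
      rw [pvPowLoop]
      simpa using ⟨haf, hca⟩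
    · rw [pvPowLoop, dif_neg h0]
      have hlt : n / 2 < n := Nat.div_lt_self (Nat.pos_of_ne_zero h0) one_lt_two
      by_cases hpar : n % 2 = 1
      · rw [if_pos hpar]
        obtain ⟨hs, hc⟩ := ih (n / 2) hlt (pvCompose base base) (pvCompose base acc)
          (fun v => g (g v)) (fun v => g (f v))
          (pvSem_compose hbg hbg hcb) (pvSem_compose hbg haf hca)
          (pvCols_compose hcb _) (pvCols_compose hcb _)
        refine ⟨fun v => ?_, hc⟩
        rw [hs v]
        show (fun w => g (g w))^[n / 2] (g (f (v % 16777216))) = g^[n] (f (v % 16777216))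
        rw [pv_iter_double, ← Function.iterate_succ_apply g, show (2 * (n / 2)).succ = n by omega]
      · rw [if_neg hpar]
        obtain ⟨hs, hc⟩ := ih (n / 2) hlt (pvCompose base base) acc
          (fun v => g (g v)) f (pvSem_compose hbg hbg hcb) haf (pvCols_compose hcb _) hca
        refine ⟨fun v => ?_, hc⟩
        rw [hs v]
        show (fun w => g (g w))^[n / 2] (f (v % 16777216)) = g^[n] (f (v % 16777216))
        rw [pv_iter_double, show 2 * (n / 2) = n by omega]

-- B's base matrix represents pvStep, its acc starts as the identity
theorem pvSem_base : pvSem ((List.range 24).map (fun j => pvStep (1 <<< j))) pvStep := by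
  intro v
  rw [pvApply_eq_pvF, pvF_matrix pvStep pvStep_linear pvStep_zero v 24 le_rfl]
  norm_num

theorem pvCols_base : pvCols ((List.range 24).map (fun j => pvStep (1 <<< j))) := by
  intro c hc
  rcases List.mem_map.mp hc with ⟨j, _, rfl⟩
  exact pv_step_lt _

theorem pvSem_id : pvSem ((List.range 24).map (fun j => (1 <<< j : Nat))) (fun v => v) := by
  intro v
  rw [pvApply_eq_pvF, pvF_matrix (fun x => x) (fun _ _ => rfl) rfl v 24 le_rfl]
  norm_num

theorem pvCols_id : pvCols ((List.range 24).map (fun j => (1 <<< j : Nat))) := by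
  intro c hc
  rcases List.mem_map.mp hc with ⟨j, hj, rfl⟩
  rw [Nat.one_shiftLeft]
  calc 2 ^ j < 2 ^ 24 := Nat.pow_lt_pow_right (by omega) (by simpa using hj)
    _ = 16777216 := by norm_num

-- ===== VERDICT (by name: the statement is the Claim_ definition above) =====
theorem get_next_secret_at_spec : Claim_equal_get_next_secret_at := by
  intro secret at_ _
  unfold Spec_get_next_secret_at get_next_secret_at get_next_secret_at_alt
  by_cases hat : at_ ≤ 0
  · rw [if_pos hat, PySem.List.pyRange_one, show (at_ - 0).toNat = 0 by omega]
    rfl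
  · rw [if_neg hat]
    set x : Nat := (PySem.Int.mod secret 16777216).toNat with hxdef
    have hx : x < 16777216 := by
      rw [hxdef, PySem.Int.mod_eq_emod_of_pos (by norm_num)]; omega
    set n : Nat := at_.toNat with hndef
    have hn : 1 ≤ n := by omega
    -- A's loop is n iterations of A's step
    rw [pv_foldl_const, PySem.List.length_pyRange_one, show (at_ - 0).toNat = n by omega]
    have hA : pvGetNextSecret^[n] secret = ((pvStep^[n] x : Nat) : Int) := by
      rw [show n = (n - 1) + 1 by omega, pv_iterA, Function.iterate_succ_apply pvStep, hxdef]
    rw [hA]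
    -- B's matrix power applies pvStep^[n]
    obtain ⟨hs, _⟩ := pvPowLoop_correct n _ _ pvStep (fun v => v)
      pvSem_base pvSem_id pvCols_base pvCols_id
    show ((pvStep^[n] x : Nat) : Int)
      = ((pvApply (pvPowLoop ((List.range 24).map (fun j => pvStep (1 <<< j)))
          ((List.range 24).map (fun j => (1 <<< j : Nat))) n) x : Nat) : Int)
    rw [hs x, Nat.mod_eq_of_lt hx]
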